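-- pv_equiv track=rewrite | github.com/bstrb/dynamicity | ici/v3/propose_next_shifts.py | _group_blocks
-- ===== SOURCE A (Python) =====
-- from typing import List, Tuple, Optional
--
-- def _group_blocks(lines: List[str]) -> List[Tuple[str, List[str]]]:
--     blocks = []
--     cur_header = None
--     cur = []
--     for ln in lines:
--         if ln.startswith("#/") and " event " in ln:
--             if cur:
--                 blocks.append((cur_header, cur))
--             cur_header = ln.rstrip("\n")
--             cur = [ln]
--         else:
--             cur.append(ln)
--     if cur:
--         blocks.append((cur_header, cur))
--     return blocks
-- ===== SOURCE B (Python) =====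
-- from typing import List, Tuple, Optional
--
-- def _group_blocks(lines: List[str]) -> List[Tuple[str, List[str]]]:
--     # Two-phase index scan: peel the (possibly empty) non-header prefix, then
--     # emit one segment per header by scanning forward to the next header.
--     def is_header(ln):
--         return ln.startswith("#/") and " event " in ln
--     n = len(lines)
--     i = 0
--     while i < n and not is_header(lines[i]):
--         i += 1
--     blocks = [(None, lines[:i])] if i > 0 else []
--     while i < n:
--         j = i + 1
--         while j < n and not is_header(lines[j]):
--             j += 1
--         blocks.append((lines[i].rstrip("\n"), lines[i:j]))
--         i = j
--     return blocks
-- ===== Notes on version B (the rewrite author's own statement) =====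
-- stated objective: alternative
-- what changed: Replaced A's single forward fold over a (blocks, cur_header, cur) three-part accumulator by a stateless two-phase index scan: first peel the non-header prefix into a (None, ...) block, then repeatedly scan ahead to the next header and slice out one segment per header.
import Mathlib
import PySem

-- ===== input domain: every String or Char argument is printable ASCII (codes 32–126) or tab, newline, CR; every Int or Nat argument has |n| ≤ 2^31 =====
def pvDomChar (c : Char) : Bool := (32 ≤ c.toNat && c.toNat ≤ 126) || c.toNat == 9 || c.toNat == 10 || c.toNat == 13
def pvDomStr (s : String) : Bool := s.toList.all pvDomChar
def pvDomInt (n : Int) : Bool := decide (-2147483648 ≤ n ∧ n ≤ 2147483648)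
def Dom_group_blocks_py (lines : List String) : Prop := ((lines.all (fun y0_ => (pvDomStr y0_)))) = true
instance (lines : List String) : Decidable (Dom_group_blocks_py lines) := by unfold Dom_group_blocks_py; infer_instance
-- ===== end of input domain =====

-- B replaces A's single fold over a (blocks, cur_header, cur) accumulator by a stateless
-- two-phase index scan (prefix peel, then one scan-to-next-header per segment); objective:
-- alternative decomposition, same cost.

-- shared primitive tests, literal ports of the Python expressions
-- ln.startswith("#/") and " event " in ln
def pvIsHeader (ln : String) : Bool :=
  PySem.Str.startswith ln "#/" && PySem.Str.isIn " event " ln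

-- ln.rstrip("\n"): drop trailing '\n' characters (hand port; exact: rstrip with an
-- explicit character set keeps the left end untouched)
def pvRstripNL (ln : String) : String :=
  String.ofList ((ln.toList.reverse.dropWhile (fun c => c == '\n')).reverse)

-- ===== PORT A =====
-- loop body of A's forward 'for ln in lines'
def stepA (st : List (Option String × List String) × Option String × List String)
    (ln : String) : List (Option String × List String) × Option String × List String :=
  let (blocks, hdr, cur) := st
  if pvIsHeader ln then
    ((if cur = [] then blocks else blocks ++ [(hdr, cur)]), some (pvRstripNL ln), [ln])
  else
    (blocks, hdr, cur ++ [ln])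

def group_blocks_py (lines : List String) : List (Option String × List String) :=
  let st := lines.foldl stepA ([], none, [])
  if st.2.2 = [] then st.1 else st.1 ++ [(st.2.1, st.2.2)]

-- ===== PORT B =====
-- B's inner scan 'while … and not is_header(…): i += 1' counted on the remaining suffix
def scanNonHeader : List String → Nat
  | [] => 0
  | ln :: rest => if pvIsHeader ln then 0 else scanNonHeader rest + 1

-- B's second phase: one (header, slice-to-next-header) segment per iteration
def segments : List String → List (Option String × List String)
  | [] => []
  | h :: tl =>
      let k := scanNonHeader tl
      (some (pvRstripNL h), h :: tl.take k) :: segments (tl.drop k)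
termination_by ls => ls.length
decreasing_by simp

def group_blocks_py_alt (lines : List String) : List (Option String × List String) :=
  let i := scanNonHeader lines
  (if i = 0 then [] else [(none, lines.take i)]) ++ segments (lines.drop i)

-- ===== PRECONDITION & SPEC =====
def Spec_group_blocks_py (lines : List String) (out : List (Option String × List String)) : Prop := out = group_blocks_py_alt lines
instance (lines : List String) (out : List (Option String × List String)) : Decidable (Spec_group_blocks_py lines out) := by unfold Spec_group_blocks_py; infer_instance

-- ===== CLAIM (what is proved, stated in full; the proofs are below) =====
def Claim_equal_group_blocks_py : Prop := ∀ (lines : List String), Dom_group_blocks_py lines → Spec_group_blocks_py lines (group_blocks_py lines)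

-- ===== LEMMAS AND PROOFS =====

-- equation lemmas for the well-founded recursion 'segments'
theorem segments_nil : segments [] = [] := by rw [segments]
theorem segments_cons (h : String) (tl : List String) :
    segments (h :: tl) =
      (some (pvRstripNL h), h :: tl.take (scanNonHeader tl)) :: segments (tl.drop (scanNonHeader tl)) := by
  rw [segments]

-- structural reading of A's loop: process the remaining lines from state (hdr, cur)
def goA (hdr : Option String) (cur : List String) : List String → List (Option String × List String)
  | [] => if cur = [] then [] else [(hdr, cur)]
  | ln :: rest =>
      if pvIsHeader ln then
        (if cur = [] then [] else [(hdr, cur)]) ++ goA (some (pvRstripNL ln)) [ln] rest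
      else goA hdr (cur ++ [ln]) rest

theorem foldA_eq_goA (lines : List String)
    (blocks : List (Option String × List String)) (hdr : Option String) (cur : List String) :
    (let st := lines.foldl stepA (blocks, hdr, cur)
     if st.2.2 = [] then st.1 else st.1 ++ [(st.2.1, st.2.2)]) = blocks ++ goA hdr cur lines := by
  induction lines generalizing blocks hdr cur with
  | nil => simp [goA]; split <;> simp_all
  | cons ln rest ih =>
      simp only [List.foldl_cons, goA, stepA]
      by_cases h : pvIsHeader ln = true
      · simp only [h, if_pos]
        rw [ih]
        split <;> simp_all
      · simp only [h, if_neg, Bool.false_eq_true, not_false_iff]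
        rw [ih]

-- a running (hdr, cur) block of A with nonempty cur closes exactly at the next header
theorem goA_eq_segments (ls : List String) : ∀ (hdr : Option String) (cur : List String), cur ≠ [] →
    goA hdr cur ls =
      (hdr, cur ++ ls.take (scanNonHeader ls)) :: segments (ls.drop (scanNonHeader ls)) := by
  induction ls with
  | nil => intro hdr cur hc; simp [goA, scanNonHeader, segments_nil, hc]
  | cons ln rest ih =>
      intro hdr cur hc
      by_cases h : pvIsHeader ln = true
      · simp only [goA, h, if_pos, scanNonHeader, if_neg hc]
        rw [ih (some (pvRstripNL ln)) [ln] (by simp)]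
        simp [segments_cons]
      · simp only [goA, h, Bool.false_eq_true, if_neg, not_false_iff, scanNonHeader]
        rw [ih hdr (cur ++ [ln]) (by simp)]
        simp

-- A's loop from the initial empty state equals B's two phases
theorem goA_nil_eq_alt (ls : List String) :
    goA none [] ls =
      (if scanNonHeader ls = 0 then [] else [(none, ls.take (scanNonHeader ls))]) ++
        segments (ls.drop (scanNonHeader ls)) := by
  cases ls with
  | nil => simp [goA, scanNonHeader, segments_nil]
  | cons ln rest =>
      by_cases h : pvIsHeader ln = true
      · simp [goA, h, scanNonHeader, segments_cons,
          goA_eq_segments rest (some (pvRstripNL ln)) [ln] (by simp)]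
      · simp only [goA, h, Bool.false_eq_true, if_neg, not_false_iff, scanNonHeader,
          List.nil_append]
        rw [goA_eq_segments rest none [ln] (by simp)]
        simp

-- ===== VERDICT (by name: the statement is the Claim_ definition above) =====
theorem group_blocks_py_spec : Claim_equal_group_blocks_py := by
  intro lines _
  unfold Spec_group_blocks_py group_blocks_py group_blocks_py_alt
  have h := foldA_eq_goA lines [] none []
  simp only [List.nil_append] at h
  rw [h, goA_nil_eq_alt]
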